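-- pv_equiv track=rewrite | github.com/MichaelReel/adventofcode-2020 | Day_07/day_07.py | get_containers
-- ===== SOURCE A (Python) =====
-- def get_containers(color, rules) -> int:
--     all_containers = set([])
--     container_list = rules[color]
--     all_containers = all_containers.union(container_list)
--     del rules[color]
--     for container in container_list:
--         if container in rules:
--             sub_contents = get_containers(container, rules)
--             all_containers = all_containers.union(sub_contents)
--     return all_containers
-- ===== SOURCE B (Python) =====
-- def get_containers(color, rules):
--     # Iterative DFS with an explicit stack instead of A's recursion.
--     # Like A, looks up `color` unguarded (KeyError if absent) and deletes
--     # every visited node from `rules` (same in-place mutation as A).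
--     container_list = rules[color]
--     del rules[color]
--     all_containers = set(container_list)
--     stack = list(reversed(list(container_list)))
--     while stack:
--         node = stack.pop()
--         if node not in rules:
--             continue
--         children = rules[node]
--         del rules[node]
--         all_containers.update(children)
--         stack.extend(reversed(list(children)))
--     return all_containers
-- ===== Notes on version B (the rewrite author's own statement) =====
-- stated objective: alternative
-- what changed: A's recursive DFS is replaced by an iterative DFS over an explicit stack seeded with color's containers (membership-checked pops, reversed pushes), accumulating the set in one loop; both mutate rules identically.
import Mathlib
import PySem

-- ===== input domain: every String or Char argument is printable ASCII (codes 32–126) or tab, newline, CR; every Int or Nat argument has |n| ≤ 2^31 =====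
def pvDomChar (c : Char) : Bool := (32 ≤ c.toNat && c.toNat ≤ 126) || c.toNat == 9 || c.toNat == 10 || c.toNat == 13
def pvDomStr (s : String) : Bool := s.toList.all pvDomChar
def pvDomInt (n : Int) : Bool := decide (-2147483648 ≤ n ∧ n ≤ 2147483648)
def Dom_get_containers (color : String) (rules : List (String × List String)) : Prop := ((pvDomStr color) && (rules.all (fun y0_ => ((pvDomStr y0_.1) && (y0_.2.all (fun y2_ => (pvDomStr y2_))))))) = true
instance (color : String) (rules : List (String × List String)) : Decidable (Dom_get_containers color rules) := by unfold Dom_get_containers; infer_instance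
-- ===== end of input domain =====

-- B replaces A's recursive DFS by an iterative explicit-stack DFS (alternative decomposition, same cost);
-- both mutate the Python dict `rules` identically (deleting every visited key) — the theorems are about the return value.

-- ===== PORT A =====
-- A's recursion is fueled (fuel only totalizes it; it is never exhausted on inputs satisfying Pre_).
mutual
def pvGoA : Nat → String → PySem.Dict String (List String) → PySem.Set String × PySem.Dict String (List String)
  | 0, _, rules => (PySem.Set.empty, rules)
  | fuel+1, color, rules =>
    match PySem.Dict.get? rules color with
    | none => (PySem.Set.empty, rules)   -- Python raises KeyError here; reachable only outside Pre_
    | some container_list =>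
        -- all_containers = set([]).union(container_list); del rules[color]; then the for-loop
        pvGoAList fuel container_list (PySem.Set.union (PySem.Set.ofList []) container_list) (rules.erase color)
  termination_by fuel _ _ => (fuel, 0)

def pvGoAList : Nat → List String → PySem.Set String → PySem.Dict String (List String) → PySem.Set String × PySem.Dict String (List String)
  | _, [], acc, rules => (acc, rules)
  | fuel, container :: rest, acc, rules =>
    if PySem.Dict.contains rules container then
      let sr := pvGoA fuel container rules
      pvGoAList fuel rest (PySem.Set.union acc sr.1) sr.2
    else
      pvGoAList fuel rest acc rules
  termination_by fuel cl _ _ => (fuel, cl.length + 1)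
end

def get_containers (color : String) (rules : List (String × List String)) : List String :=
  let d : PySem.Dict String (List String) := PySem.Dict.mk rules
  (pvGoA (d.size + 1) color d).1

-- ===== PORT B =====
def pvTS (d : PySem.Dict String (List String)) : Nat := (d.items.map (fun p => p.2.length)).sum

def pvLoopB : Nat → List String → PySem.Set String → PySem.Dict String (List String) → PySem.Set String
  | 0, _, acc, _ => acc
  | fuel+1, stack, acc, rules =>
    match stack.getLast? with          -- node = stack.pop()  (pop from the end)
    | none => acc                      -- while-loop exit: empty stack
    | some node =>
      match PySem.Dict.get? rules node with
      | none => pvLoopB fuel stack.dropLast acc rules     -- if node not in rules: continue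
      | some children =>
        pvLoopB fuel (stack.dropLast ++ children.reverse)
          (PySem.Set.update acc children) (rules.erase node)

def get_containers_alt (color : String) (rules : List (String × List String)) : List String :=
  let d : PySem.Dict String (List String) := PySem.Dict.mk rules
  match PySem.Dict.get? d color with
  | none => []   -- Python raises KeyError here; reachable only outside Pre_
  | some container_list =>
      pvLoopB (container_list.length + pvTS (d.erase color) + 1)
        container_list.reverse (PySem.Set.ofList container_list) (d.erase color)

-- ===== PRECONDITION & SPEC =====
-- Pre_ excludes exactly the inputs where rules[color] raises KeyError (both Pythons raise there).
def Pre_get_containers (color : String) (rules : List (String × List String)) : Prop :=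
  PySem.Dict.contains (PySem.Dict.mk rules) color = true
instance (color : String) (rules : List (String × List String)) : Decidable (Pre_get_containers color rules) := by unfold Pre_get_containers; infer_instance

def pvWitness_get_containers : String × (List (String × List String)) :=
  ("shiny gold", [("shiny gold", ["muted yellow", "dark olive"]), ("muted yellow", ["dark olive"]), ("dark olive", [])])

def Spec_get_containers (color : String) (rules : List (String × List String)) (out : List String) : Prop := out = get_containers_alt color rules
instance (color : String) (rules : List (String × List String)) (out : List String) : Decidable (Spec_get_containers color rules out) := by unfold Spec_get_containers; infer_instance

-- ===== CLAIM (what is proved, stated in full; the proofs are below) =====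
def Claim_equal_get_containers : Prop := ∀ (color : String) (rules : List (String × List String)), Dom_get_containers color rules → Pre_get_containers color rules → Spec_get_containers color rules (get_containers color rules)


-- ===== LEMMAS AND PROOFS =====

-- abbreviations for the proofs
def pvMu (stack : List String) (d : PySem.Dict String (List String)) : Nat := stack.length + pvTS d
def pvRunB (stack : List String) (acc : PySem.Set String) (d : PySem.Dict String (List String)) : PySem.Set String :=
  pvLoopB (pvMu stack d + 1) stack acc d

lemma pvRunB_nil (acc : PySem.Set String) (d : PySem.Dict String (List String)) : pvRunB [] acc d = acc := by
  simp [pvRunB, pvLoopB]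

lemma pvContains_of_get? (d : PySem.Dict String (List String)) (k : String) (cl : List String)
    (h : PySem.Dict.get? d k = some cl) : PySem.Dict.contains d k = true := by
  rw [PySem.Dict.contains_eq_isSome_get?, h]; rfl

lemma pvGet?_of_not_contains (d : PySem.Dict String (List String)) (k : String)
    (h : ¬ PySem.Dict.contains d k = true) : PySem.Dict.get? d k = none := by
  rw [PySem.Dict.contains_eq_isSome_get?] at h
  cases hg : PySem.Dict.get? d k with
  | none => rfl
  | some v => rw [hg] at h; simp at h

-- erase shrinks the dict
lemma pvSize_erase_le (d : PySem.Dict String (List String)) (k : String) : (d.erase k).size ≤ d.size := by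
  simp only [PySem.Dict.erase, PySem.Dict.size]
  exact List.length_filter_le _ _

lemma pvSize_erase_lt (d : PySem.Dict String (List String)) (k : String)
    (h : PySem.Dict.contains d k = true) : (d.erase k).size < d.size := by
  simp only [PySem.Dict.erase, PySem.Dict.size]
  apply List.length_filter_lt_length_iff_exists.mpr
  simp only [PySem.Dict.contains, List.any_eq_true] at h
  obtain ⟨p, hp, hk⟩ := h
  exact ⟨p, hp, by simp [hk]⟩

lemma pvSumFilter_le (l : List (String × List String)) (p : (String × List String) → Bool) :
    ((l.filter p).map (fun q => q.2.length)).sum ≤ (l.map (fun q => q.2.length)).sum :=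
  List.Sublist.sum_le_sum (List.Sublist.map _ List.filter_sublist) (fun x _ => Nat.zero_le x)

lemma pvTS_erase_add (d : PySem.Dict String (List String)) (k : String) (cl : List String)
    (h : PySem.Dict.get? d k = some cl) : pvTS (d.erase k) + cl.length ≤ pvTS d := by
  obtain ⟨items⟩ := d
  simp only [pvTS, PySem.Dict.erase, PySem.Dict.get?] at *
  induction items with
  | nil => simp at h
  | cons p rest ih =>
    by_cases hk : (p.1 == k) = true
    · simp only [List.find?_cons, hk, Option.map_some, Option.some.injEq] at h
      have h2 := pvSumFilter_le rest (fun q => !q.1 == k)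
      simp only [List.filter_cons, hk, Bool.not_true, Bool.false_eq_true, if_false,
        List.map_cons, List.sum_cons]
      rw [← h]
      omega
    · simp only [List.find?_cons, hk, Option.map] at h
      have h3 := ih h
      simp only [Bool.not_eq_true] at hk
      simp only [List.filter_cons, hk, Bool.not_false, if_true, List.map_cons, List.sum_cons]
      omega

-- A's recursion only erases: the threaded dict never grows
lemma pvGoA_size (n : Nat) :
    (∀ c d, (pvGoA n c d).2.size ≤ d.size) ∧
    (∀ cl acc d, (pvGoAList n cl acc d).2.size ≤ d.size) := by
  induction n with
  | zero =>
    have hP : ∀ c d, (pvGoA 0 c d).2.size ≤ (d : PySem.Dict String (List String)).size := by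
      intro c d; simp [pvGoA]
    refine ⟨hP, ?_⟩
    intro cl
    induction cl with
    | nil => intro acc d; simp [pvGoAList]
    | cons c rest ihc =>
      intro acc d
      by_cases h : PySem.Dict.contains d c = true
      · simp only [pvGoAList, h, if_true]
        exact le_trans (ihc _ _) (hP c d)
      · simp only [pvGoAList, h, Bool.false_eq_true, if_false]
        exact ihc _ _
  | succ n ih =>
    have hP : ∀ c d, (pvGoA (n+1) c d).2.size ≤ (d : PySem.Dict String (List String)).size := by
      intro c d
      cases hg : PySem.Dict.get? d c with
      | none => simp [pvGoA, hg]
      | some cl =>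
        simp only [pvGoA, hg]
        exact le_trans (ih.2 _ _ _) (pvSize_erase_le d c)
    refine ⟨hP, ?_⟩
    intro cl
    induction cl with
    | nil => intro acc d; simp [pvGoAList]
    | cons c rest ihc =>
      intro acc d
      by_cases h : PySem.Dict.contains d c = true
      · simp only [pvGoAList, h, if_true]
        exact le_trans (ihc _ _) (hP c d)
      · simp only [pvGoAList, h, Bool.false_eq_true, if_false]
        exact ihc _ _

-- fuel irrelevance for A: any fuel exceeding the dict size gives the same result
lemma pvGoA_fuel (n : Nat) :
    (∀ m c d, d.size < n → d.size < m → pvGoA n c d = pvGoA m c d) ∧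
    (∀ m cl acc d, d.size < n → d.size < m → pvGoAList n cl acc d = pvGoAList m cl acc d) := by
  induction n with
  | zero => exact ⟨fun m c d h => absurd h (by omega), fun m cl acc d h => absurd h (by omega)⟩
  | succ n ih =>
    have hP : ∀ m c d, (d : PySem.Dict String (List String)).size < n + 1 → d.size < m →
        pvGoA (n+1) c d = pvGoA m c d := by
      intro m c d h1 h2
      cases m with
      | zero => omega
      | succ m' =>
        cases hg : PySem.Dict.get? d c with
        | none => simp [pvGoA, hg]
        | some cl =>
          simp only [pvGoA, hg]
          have hlt := pvSize_erase_lt d c (pvContains_of_get? d c cl hg)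
          exact ih.2 m' cl _ _ (by omega) (by omega)
    refine ⟨hP, ?_⟩
    intro m cl
    induction cl generalizing m with
    | nil =>
      intro acc d h1 h2
      cases m with
      | zero => omega
      | succ m' => simp [pvGoAList]
    | cons c rest ihc =>
      intro acc d h1 h2
      cases m with
      | zero => omega
      | succ m' =>
        by_cases h : PySem.Dict.contains d c = true
        · simp only [pvGoAList, h, if_true]
          rw [← hP (m'+1) c d h1 h2]
          have hsz := (pvGoA_size (n+1)).1 c d
          exact ihc (m'+1) _ _ (by omega) (by omega)
        · simp only [pvGoAList, h, Bool.false_eq_true, if_false]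
          exact ihc (m'+1) _ _ h1 h2

-- set-union bookkeeping: update is associative over add / update
lemma pvUpdate_add (x : PySem.Set String) (b : List String) (y : String) :
    PySem.Set.add (PySem.Set.update x b) y = PySem.Set.update x (PySem.Set.add b y) := by
  by_cases hy : y ∈ b
  · rw [PySem.Set.add_of_mem hy, PySem.Set.add_of_mem ((PySem.Set.mem_update _ _ _).mpr (Or.inr hy))]
  · rw [PySem.Set.add_of_not_mem hy]
    simp [PySem.Set.update, List.foldl_append]

lemma pvUpdate_update (x : PySem.Set String) (b s : List String) :
    PySem.Set.update (PySem.Set.update x b) s = PySem.Set.update x (PySem.Set.update b s) := by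
  induction s generalizing b with
  | nil => rfl
  | cons y t ih =>
    rw [PySem.Set.update_cons, PySem.Set.update_cons, pvUpdate_add, ih, ← PySem.Set.update_cons]

lemma pvUpdate_ofList (a : PySem.Set String) (xs : List String) :
    PySem.Set.update a (PySem.Set.ofList xs) = PySem.Set.update a xs := by
  rw [PySem.Set.update_eq_append_filter, PySem.Set.update_eq_append_filter, PySem.Set.ofList_ofList]

-- accumulator factorization for A's loop
lemma pvGoAList_acc (n : Nat) (cl : List String) (a b : PySem.Set String) (d : PySem.Dict String (List String)) :
    pvGoAList n cl (PySem.Set.update a b) d =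
      (PySem.Set.update a (pvGoAList n cl b d).1, (pvGoAList n cl b d).2) := by
  induction cl generalizing a b d with
  | nil => simp [pvGoAList]
  | cons c rest ih =>
    by_cases h : PySem.Dict.contains d c = true
    · simp only [pvGoAList, h, if_true]
      have : PySem.Set.union (PySem.Set.update a b) (pvGoA n c d).1
           = PySem.Set.update a (PySem.Set.union b (pvGoA n c d).1) := pvUpdate_update a b _
      rw [this]
      exact ih a _ _
    · simp only [pvGoAList, h, Bool.false_eq_true, if_false]
      exact ih a b d

-- fuel irrelevance for B: any fuel exceeding μ = |stack| + total rule size gives the same result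
lemma pvLoopB_fuel (n : Nat) : ∀ (m : Nat) (stack : List String) (acc : PySem.Set String)
    (d : PySem.Dict String (List String)),
    pvMu stack d < n → pvMu stack d < m → pvLoopB n stack acc d = pvLoopB m stack acc d := by
  induction n with
  | zero => intro m stack acc d h; omega
  | succ n ih =>
    intro m stack acc d h1 h2
    cases m with
    | zero => omega
    | succ m' =>
      cases hL : stack.getLast? with
      | none => simp [pvLoopB, hL]
      | some node =>
        have hst : stack ≠ [] := by intro h; subst h; simp at hL
        have hlen : 0 < stack.length := List.length_pos_iff.mpr hst
        cases hg : PySem.Dict.get? d node with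
        | none =>
          simp only [pvLoopB, hL, hg]
          have hdl : stack.dropLast.length = stack.length - 1 := List.length_dropLast
          exact ih m' _ acc d (by simp only [pvMu] at *; omega) (by simp only [pvMu] at *; omega)
        | some children =>
          simp only [pvLoopB, hL, hg]
          have hts := pvTS_erase_add d node children hg
          have hdl : stack.dropLast.length = stack.length - 1 := List.length_dropLast
          have hmu : pvMu (stack.dropLast ++ children.reverse) (d.erase node) < pvMu stack d := by
            simp only [pvMu, List.length_append, List.length_reverse, hdl]; omega
          exact ih m' _ _ _ (by omega) (by omega)

-- the bridge: B's stack loop computes exactly A's recursion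
lemma pvBridge : ∀ (S : Nat) (d : PySem.Dict String (List String)), d.size ≤ S →
    ∀ (cl : List String) (n : Nat) (stack : List String) (acc : PySem.Set String), d.size < n →
    pvRunB (stack ++ cl.reverse) acc d =
      pvRunB stack (pvGoAList n cl acc d).1 (pvGoAList n cl acc d).2 := by
  intro S
  induction S using Nat.strong_induction_on with
  | _ S ihS =>
    intro d hd cl
    induction cl with
    | nil => intro n stack acc hn; simp [pvGoAList]
    | cons c rest ihc =>
      intro n stack acc hn
      have hassoc : stack ++ (c :: rest).reverse = (stack ++ rest.reverse) ++ [c] := by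
        simp [List.reverse_cons]
      rw [hassoc]
      by_cases hc : PySem.Dict.contains d c = true
      · -- c is still in rules: pop it, union its children, erase it, push children
        have hgs : (PySem.Dict.get? d c).isSome = true := by
          rw [← PySem.Dict.contains_eq_isSome_get?]; exact hc
        obtain ⟨ccl, hg⟩ := Option.isSome_iff_exists.mp hgs
        have hlt := pvSize_erase_lt d c hc
        have hts := pvTS_erase_add d c ccl hg
        -- unfold one iteration of B's loop
        have hstep1 : pvRunB ((stack ++ rest.reverse) ++ [c]) acc d =
            pvLoopB (pvMu ((stack ++ rest.reverse) ++ [c]) d) ((stack ++ rest.reverse) ++ ccl.reverse)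
              (PySem.Set.update acc ccl) (d.erase c) := by
          rw [pvRunB]
          simp only [pvLoopB, List.getLast?_concat, List.dropLast_concat, hg]
        have hstep2 : pvLoopB (pvMu ((stack ++ rest.reverse) ++ [c]) d)
              ((stack ++ rest.reverse) ++ ccl.reverse) (PySem.Set.update acc ccl) (d.erase c) =
            pvRunB ((stack ++ rest.reverse) ++ ccl.reverse) (PySem.Set.update acc ccl) (d.erase c) := by
          apply pvLoopB_fuel
          · simp only [pvMu, List.length_append, List.length_reverse, List.length_cons,
              List.length_nil]
            omega
          · omega
        rw [hstep1, hstep2]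
        -- IH on the erased (strictly smaller) dict, stack := stack ++ rest.reverse
        have h1 := ihS (d.erase c).size (by omega) (d.erase c) le_rfl ccl d.size
          (stack ++ rest.reverse) (PySem.Set.update acc ccl) hlt
        rw [h1]
        -- factor the accumulator out of A's inner recursion
        have hacc : pvGoAList d.size ccl (PySem.Set.update acc ccl) (d.erase c) =
            (PySem.Set.update acc (pvGoAList d.size ccl (PySem.Set.ofList ccl) (d.erase c)).1,
             (pvGoAList d.size ccl (PySem.Set.ofList ccl) (d.erase c)).2) := by
          rw [← pvUpdate_ofList acc ccl]
          exact pvGoAList_acc _ _ _ _ _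
        rw [hacc]
        set r0 := (pvGoAList d.size ccl (PySem.Set.ofList ccl) (d.erase c)).2 with hr0
        set s0 := (pvGoAList d.size ccl (PySem.Set.ofList ccl) (d.erase c)).1 with hs0
        have hr0sz : r0.size ≤ (d.erase c).size := (pvGoA_size d.size).2 _ _ _
        -- IH on the dict returned by the subtree, to consume `stack`
        have h2 := ihS r0.size (by omega) r0 le_rfl rest n stack (PySem.Set.update acc s0) (by omega)
        rw [h2]
        -- now compute A's side of the goal
        have hAeq : pvGoA n c d = (s0, r0) := by
          rw [(pvGoA_fuel n).1 (d.size + 1) c d hn (by omega)]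
          simp only [pvGoA, hg]
          rfl
        have hA : pvGoAList n (c :: rest) acc d =
            pvGoAList n rest (PySem.Set.update acc s0) r0 := by
          simp only [pvGoAList, hc, if_true, hAeq]
          rfl
        rw [hA]
      · -- c was already consumed: B pops and skips, A's loop skips
        have hg := pvGet?_of_not_contains d c hc
        have hstep1 : pvRunB ((stack ++ rest.reverse) ++ [c]) acc d =
            pvLoopB (pvMu ((stack ++ rest.reverse) ++ [c]) d) (stack ++ rest.reverse) acc d := by
          rw [pvRunB]
          simp only [pvLoopB, List.getLast?_concat, List.dropLast_concat, hg]
        have hmu : pvMu ((stack ++ rest.reverse) ++ [c]) d = pvMu (stack ++ rest.reverse) d + 1 := by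
          simp only [pvMu, List.length_append, List.length_cons, List.length_nil]
          omega
        rw [hstep1, hmu]
        rw [show pvLoopB (pvMu (stack ++ rest.reverse) d + 1) (stack ++ rest.reverse) acc d =
              pvRunB (stack ++ rest.reverse) acc d from rfl]
        rw [ihc n stack acc hn]
        simp only [pvGoAList, hc, Bool.false_eq_true, if_false]

-- ===== VERDICT (by name: the statement is the Claim_ definition above) =====
theorem get_containers_spec : Claim_equal_get_containers := by
  intro color rules _ hpre
  have hc : PySem.Dict.contains (PySem.Dict.mk rules) color = true := hpre
  have hgs : (PySem.Dict.get? (PySem.Dict.mk rules) color).isSome = true := by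
    rw [← PySem.Dict.contains_eq_isSome_get?]; exact hc
  obtain ⟨cl, hg⟩ := Option.isSome_iff_exists.mp hgs
  have hlt := pvSize_erase_lt (PySem.Dict.mk rules) color hc
  -- A's side: one unfolding of the recursion
  have hA : get_containers color rules =
      (pvGoAList (PySem.Dict.mk rules).size cl (PySem.Set.ofList cl)
        ((PySem.Dict.mk rules).erase color)).1 := by
    unfold get_containers
    simp only [pvGoA, hg]
    rfl
  -- B's side: reduce the initial lookup, then fold the loop into pvRunB (fuel is exactly μ + 1)
  have hR : get_containers_alt color rules =
      pvLoopB (cl.length + pvTS ((PySem.Dict.mk rules).erase color) + 1) cl.reverse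
        (PySem.Set.ofList cl) ((PySem.Dict.mk rules).erase color) := by
    unfold get_containers_alt
    simp only [hg]
  have hB : pvLoopB (cl.length + pvTS ((PySem.Dict.mk rules).erase color) + 1) cl.reverse
        (PySem.Set.ofList cl) ((PySem.Dict.mk rules).erase color) =
      pvRunB cl.reverse (PySem.Set.ofList cl) ((PySem.Dict.mk rules).erase color) := by
    simp only [pvRunB, pvMu, List.length_reverse]
  have hbr := pvBridge ((PySem.Dict.mk rules).erase color).size
    ((PySem.Dict.mk rules).erase color) le_rfl cl (PySem.Dict.mk rules).size []
    (PySem.Set.ofList cl) hlt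
  simp only [List.nil_append] at hbr
  show get_containers color rules = get_containers_alt color rules
  rw [hA, hR, hB, hbr, pvRunB_nil]
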